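-- pv_equiv track=rewrite | github.com/Tiago-Goncalves98/Connect-N | controllers/func_registros.py | remover_jogador
-- ===== SOURCE A (Python) =====
-- def remover_jogador(game,nome):
--     checker = False
--     for i in game["players"]:
--         if nome == i["name"]:
--             checker = True
--
--     if checker == False:
--         return "Jogador não existente."
--
--     elif checker == True and nome in (i.values() for i in game["currentPlayers"]):
--         return "Jogador participa no jogo em curso."
--
--     else:
--         for player in game["players"]:
--             if nome == player["name"]:
--                 game["players"].remove(player)
--                 return "Jogador removido com sucesso."
-- ===== SOURCE B (Python) =====
-- def remover_jogador(game, nome):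
--     # Single pass: find-and-remove in one loop; A's currentPlayers elif is dead
--     # code (str vs dict_values comparison, always False) and is omitted.
--     for player in game["players"]:
--         if player["name"] == nome:
--             game["players"].remove(player)
--             return "Jogador removido com sucesso."
--     return "Jogador não existente."
-- ===== Notes on version B (the rewrite author's own statement) =====
-- stated objective: simpler
-- what changed: B merges A's separate existence scan and find-and-remove scan into one loop and drops A's unreachable currentPlayers branch (a str-vs-dict_values membership test that is always False), returning on the first matching player.
import Mathlib
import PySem

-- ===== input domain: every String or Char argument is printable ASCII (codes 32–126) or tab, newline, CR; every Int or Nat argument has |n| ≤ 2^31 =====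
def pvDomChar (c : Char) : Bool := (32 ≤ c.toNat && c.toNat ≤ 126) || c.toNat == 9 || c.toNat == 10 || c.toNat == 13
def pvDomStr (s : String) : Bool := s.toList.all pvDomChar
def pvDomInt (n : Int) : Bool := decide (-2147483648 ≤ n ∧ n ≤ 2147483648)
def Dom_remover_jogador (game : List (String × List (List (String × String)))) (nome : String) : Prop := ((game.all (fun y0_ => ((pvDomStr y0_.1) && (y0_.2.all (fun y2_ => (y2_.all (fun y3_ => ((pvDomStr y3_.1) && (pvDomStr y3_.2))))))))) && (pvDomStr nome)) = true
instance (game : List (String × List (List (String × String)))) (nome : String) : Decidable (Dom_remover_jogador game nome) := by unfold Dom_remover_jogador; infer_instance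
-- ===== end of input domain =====

-- B merges A's two scans over game["players"] into one find-and-remove loop and drops
-- A's unreachable currentPlayers branch (str-vs-dict_values membership, always False).
-- A and B both mutate game["players"] in place; the equivalence proved here is about
-- the RETURN value only (B performs the same removal of the first matching player).

-- ===== PORT A =====
-- i["name"]; Pre_ guarantees the key is present, so the "" default is never the value used.
def pvNameOf (p : List (String × String)) : String := ((PySem.Dict.mk p).get? "name").getD ""

-- Python's `nome in (i.values() for i in …)` compares a str with a dict_values object:
-- equality between values of different types, always False in Python.
def pvStrEqValues (_s : String) (_vs : List String) : Bool := false

-- A's second loop: find the matching player, remove it, return; unreachable fallthrough.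
def pvRemoveLoopA (players : List (List (String × String))) (nome : String) : String :=
  match players with
  | [] => ""  -- unreachable: only entered when checker = true, i.e. a match exists
  | p :: rest => if nome == pvNameOf p then "Jogador removido com sucesso." else pvRemoveLoopA rest nome

def remover_jogador (game : List (String × List (List (String × String)))) (nome : String) : String :=
  let players := ((PySem.Dict.mk game).get? "players").getD []
  let checker := players.foldl (fun c i => if nome == pvNameOf i then true else c) false
  if checker = false then "Jogador não existente."
  else if checker = true && (((PySem.Dict.mk game).get? "currentPlayers").getD []).any
        (fun i => pvStrEqValues nome (i.map (·.2))) then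
    "Jogador participa no jogo em curso."
  else pvRemoveLoopA players nome

-- ===== PORT B =====
-- B's single loop: first match → removed-successfully; exhausted → not-existent.
def pvLoopB (players : List (List (String × String))) (nome : String) : String :=
  match players with
  | [] => "Jogador não existente."
  | p :: rest => if pvNameOf p == nome then "Jogador removido com sucesso." else pvLoopB rest nome

def remover_jogador_alt (game : List (String × List (List (String × String)))) (nome : String) : String :=
  pvLoopB (((PySem.Dict.mk game).get? "players").getD []) nome

-- ===== PRECONDITION & SPEC =====
-- Pre_ = exactly the inputs on which Python A returns: the "players" key exists, every
-- player dict has a "name" key, and if some player's name equals nome (so the elif is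
-- evaluated) the "currentPlayers" key exists too; outside this A raises KeyError.
def Pre_remover_jogador (game : List (String × List (List (String × String)))) (nome : String) : Prop :=
  ((PySem.Dict.mk game).get? "players").isSome = true ∧
  (∀ p ∈ ((PySem.Dict.mk game).get? "players").getD [], ((PySem.Dict.mk p).get? "name").isSome = true) ∧
  ((∃ p ∈ ((PySem.Dict.mk game).get? "players").getD [], (PySem.Dict.mk p).get? "name" = some nome) →
    ((PySem.Dict.mk game).get? "currentPlayers").isSome = true)
instance (game : List (String × List (List (String × String)))) (nome : String) : Decidable (Pre_remover_jogador game nome) := by unfold Pre_remover_jogador; infer_instance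

def pvWitness_remover_jogador : (List (String × List (List (String × String)))) × String :=
  ([("players", [[("name", "ana")], [("name", "bob")]]), ("currentPlayers", [])], "ana")

def Spec_remover_jogador (game : List (String × List (List (String × String)))) (nome : String) (out : String) : Prop := out = remover_jogador_alt game nome
instance (game : List (String × List (List (String × String)))) (nome : String) (out : String) : Decidable (Spec_remover_jogador game nome out) := by unfold Spec_remover_jogador; infer_instance

-- ===== CLAIM (what is proved, stated in full; the proofs are below) =====
def Claim_equal_remover_jogador : Prop := ∀ (game : List (String × List (List (String × String)))) (nome : String), Dom_remover_jogador game nome → Pre_remover_jogador game nome → Spec_remover_jogador game nome (remover_jogador game nome)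

-- ===== LEMMAS AND PROOFS =====

-- A's checker fold is an `any` over the same predicate.
theorem checker_eq_any (nome : String) (l : List (List (String × String))) (b : Bool) :
    l.foldl (fun c i => if nome == pvNameOf i then true else c) b
      = (b || l.any (fun i => nome == pvNameOf i)) := by
  induction l generalizing b with
  | nil => simp
  | cons p rest ih =>
    simp only [List.foldl_cons, List.any_cons, ih]
    by_cases h : nome == pvNameOf p <;> simp [h]

-- When no player matches, B's loop returns "not existent".
theorem loopB_no_match (nome : String) (l : List (List (String × String)))
    (h : l.any (fun i => nome == pvNameOf i) = false) :
    pvLoopB l nome = "Jogador não existente." := by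
  induction l with
  | nil => rfl
  | cons p rest ih =>
    simp only [List.any_cons, Bool.or_eq_false_iff] at h
    have hne : (pvNameOf p == nome) = false := by
      simp only [beq_eq_false_iff_ne] at h ⊢
      exact fun e => h.1 e.symm
    simp [pvLoopB, hne, ih h.2]

-- When some player matches, A's removal loop and B's loop both return "removed".
theorem loops_match (nome : String) (l : List (List (String × String)))
    (h : l.any (fun i => nome == pvNameOf i) = true) :
    pvRemoveLoopA l nome = "Jogador removido com sucesso." ∧
    pvLoopB l nome = "Jogador removido com sucesso." := by
  induction l with
  | nil => simp at h
  | cons p rest ih =>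
    by_cases hp : nome = pvNameOf p
    · constructor
      · simp [pvRemoveLoopA, hp]
      · simp [pvLoopB, hp]
    · have hb : (nome == pvNameOf p) = false := by simp [hp]
      simp only [List.any_cons, hb, Bool.false_or] at h
      have := ih h
      constructor
      · simpa [pvRemoveLoopA, hb] using this.1
      · have hb' : (pvNameOf p == nome) = false := by
          simp only [beq_eq_false_iff_ne]; exact fun e => hp e.symm
        simpa [pvLoopB, hb'] using this.2

-- ===== VERDICT (by name: the statement is the Claim_ definition above) =====
theorem remover_jogador_spec : Claim_equal_remover_jogador := by
  intro game nome _ _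
  unfold Spec_remover_jogador remover_jogador remover_jogador_alt
  set l := ((PySem.Dict.mk game).get? "players").getD [] with hl
  simp only [checker_eq_any, Bool.false_or]
  cases h : l.any (fun i => nome == pvNameOf i) with
  | false => simp [loopB_no_match nome l h]
  | true =>
    have := loops_match nome l h
    simp [pvStrEqValues, this.1, this.2]
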